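-- pv_equiv track=rewrite | github.com/MGWXP/priv | src/utils/merge_helper.py | auto_merge_conflict_blocks
-- ===== SOURCE A (Python) =====
-- from typing import List
--
-- def auto_merge_conflict_blocks(content: str) -> str:
--     """Resolve simple git conflict markers using heuristics.
--
--     Parameters
--     ----------
--     content:
--         File content potentially containing conflict markers.
--
--     Returns
--     -------
--     str
--         Content with conflicts resolved.
--     """
--
--     lines = content.splitlines()
--     resolved: List[str] = []
--     i = 0
--     while i < len(lines):
--         line = lines[i]
--         if line.startswith("<<<<<<<"):
--             head: List[str] = []
--             i += 1
--             while i < len(lines) and not lines[i].startswith("======="):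
--                 head.append(lines[i])
--                 i += 1
--             i += 1  # skip =======
--             incoming: List[str] = []
--             while i < len(lines) and not lines[i].startswith(">>>>>>>"):
--                 incoming.append(lines[i])
--                 i += 1
--             i += 1  # skip >>>>>>>
--             block = incoming if len(incoming) >= len(head) else head
--             resolved.extend(block)
--             continue
--         resolved.append(line)
--         i += 1
--     return "\n".join(resolved)
-- ===== SOURCE B (Python) =====
-- def auto_merge_conflict_blocks(content: str) -> str:
--     """Resolve simple git conflict markers: single flat state-machine pass."""
--     resolved = []
--     head = []
--     incoming = []
--     mode = 0  # 0 normal, 1 collecting head, 2 collecting incoming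
--     for line in content.splitlines():
--         if mode == 0:
--             if line.startswith("<<<<<<<"):
--                 head = []
--                 incoming = []
--                 mode = 1
--             else:
--                 resolved.append(line)
--         elif mode == 1:
--             if line.startswith("======="):
--                 mode = 2
--             else:
--                 head.append(line)
--         else:
--             if line.startswith(">>>>>>>"):
--                 resolved.extend(incoming if len(incoming) >= len(head) else head)
--                 mode = 0
--             else:
--                 incoming.append(line)
--     if mode != 0:
--         resolved.extend(incoming if len(incoming) >= len(head) else head)
--     return "\n".join(resolved)
-- ===== Notes on version B (the rewrite author's own statement) =====
-- stated objective: alternative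
-- what changed: Replaced the index-driven outer while loop with two nested marker-scanning inner while loops by a single flat pass over the lines keeping a mode variable (normal/head/incoming) and two buffers, flushing an unterminated block at EOF with the same >= tie-break.
import Mathlib
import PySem

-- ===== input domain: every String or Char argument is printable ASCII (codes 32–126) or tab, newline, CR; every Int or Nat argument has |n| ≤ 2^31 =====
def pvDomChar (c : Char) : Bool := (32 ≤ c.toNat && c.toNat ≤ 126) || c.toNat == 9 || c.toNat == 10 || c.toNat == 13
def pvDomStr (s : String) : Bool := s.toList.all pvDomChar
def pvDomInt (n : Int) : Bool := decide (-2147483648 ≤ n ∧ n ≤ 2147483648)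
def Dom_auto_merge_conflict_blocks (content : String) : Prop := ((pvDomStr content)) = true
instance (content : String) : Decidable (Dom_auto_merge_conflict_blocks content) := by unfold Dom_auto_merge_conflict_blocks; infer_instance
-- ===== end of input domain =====

-- B replaces A's nested index-driven while loops by one flat state-machine pass (alternative decomposition, same cost).

-- ===== PORT A =====
-- loop conditions of A's two inner while loops
def pvNotSep (l : String) : Bool := !(PySem.Str.startswith l "=======")
def pvNotEnd (l : String) : Bool := !(PySem.Str.startswith l ">>>>>>>")

-- outer while loop of A; the two inner marker-scanning loops are the
-- takeWhile/dropWhile pairs (append-while-not-marker), the `.tail`s are the `i += 1` skips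
def aLoop : List String → List String
  | [] => []
  | line :: rest =>
    if PySem.Str.startswith line "<<<<<<<" then
      (if (((rest.dropWhile pvNotSep).tail).takeWhile pvNotEnd).length ≥ (rest.takeWhile pvNotSep).length
        then ((rest.dropWhile pvNotSep).tail).takeWhile pvNotEnd
        else rest.takeWhile pvNotSep)
      ++ aLoop ((((rest.dropWhile pvNotSep).tail).dropWhile pvNotEnd).tail)
    else
      line :: aLoop rest
termination_by ls => ls.length
decreasing_by
  · have h5 := List.length_dropWhile_le pvNotSep rest
    have h4 : (rest.dropWhile pvNotSep).tail.length = (rest.dropWhile pvNotSep).length - 1 := by simp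
    have h2 := List.length_dropWhile_le pvNotEnd ((rest.dropWhile pvNotSep).tail)
    have h3 : (((rest.dropWhile pvNotSep).tail).dropWhile pvNotEnd).tail.length
        = (((rest.dropWhile pvNotSep).tail).dropWhile pvNotEnd).length - 1 := by simp
    simp only [List.length_cons]
    omega
  · simp

def auto_merge_conflict_blocks (content : String) : String :=
  PySem.Str.join "\n" (aLoop (PySem.Str.splitlines content))

-- ===== PORT B =====
inductive PMode where
  | normal | inHead | inIncoming
deriving DecidableEq, Repr

-- B's single for-loop over the lines, with the EOF flush of Source B applied in the [] case
def bLoop : List String → PMode → List String → List String → List String → List String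
  | [], mode, resolved, head, incoming =>
      match mode with
      | .normal => resolved
      | _ => resolved ++ (if incoming.length ≥ head.length then incoming else head)
  | l :: rest, .normal, resolved, head, incoming =>
      if PySem.Str.startswith l "<<<<<<<" then bLoop rest .inHead resolved [] []
      else bLoop rest .normal (resolved ++ [l]) head incoming
  | l :: rest, .inHead, resolved, head, incoming =>
      if PySem.Str.startswith l "=======" then bLoop rest .inIncoming resolved head incoming
      else bLoop rest .inHead resolved (head ++ [l]) incoming
  | l :: rest, .inIncoming, resolved, head, incoming =>
      if PySem.Str.startswith l ">>>>>>>" then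
        bLoop rest .normal (resolved ++ (if incoming.length ≥ head.length then incoming else head)) [] []
      else bLoop rest .inIncoming resolved head (incoming ++ [l])

def auto_merge_conflict_blocks_alt (content : String) : String :=
  PySem.Str.join "\n" (bLoop (PySem.Str.splitlines content) .normal [] [] [])

-- ===== PRECONDITION & SPEC =====
def Spec_auto_merge_conflict_blocks (content : String) (out : String) : Prop := out = auto_merge_conflict_blocks_alt content
instance (content : String) (out : String) : Decidable (Spec_auto_merge_conflict_blocks content out) := by unfold Spec_auto_merge_conflict_blocks; infer_instance

-- ===== CLAIM (what is proved, stated in full; the proofs are below) =====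
def Claim_equal_auto_merge_conflict_blocks : Prop := ∀ (content : String), Dom_auto_merge_conflict_blocks content → Spec_auto_merge_conflict_blocks content (auto_merge_conflict_blocks content)

-- ===== LEMMAS AND PROOFS =====

-- B's incoming mode characterised by A's second inner scan
lemma bLoop_inIncoming (ls resolved head incoming : List String) :
    bLoop ls .inIncoming resolved head incoming =
      match ls.dropWhile pvNotEnd with
      | [] => resolved ++ (if (incoming ++ ls.takeWhile pvNotEnd).length ≥ head.length
                then incoming ++ ls.takeWhile pvNotEnd else head)
      | _ :: r => bLoop r .normal
          (resolved ++ (if (incoming ++ ls.takeWhile pvNotEnd).length ≥ head.length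
            then incoming ++ ls.takeWhile pvNotEnd else head)) [] [] := by
  induction ls generalizing incoming with
  | nil => simp [bLoop]
  | cons l rest ih =>
      by_cases h : PySem.Str.startswith l ">>>>>>>"
      all_goals simp at h
      · simp [bLoop, h, pvNotEnd, List.dropWhile_cons, List.takeWhile_cons]
      · simp only [bLoop, PySem.Str.startswith_eq]
        simp only [show PySem.Chars.startswith l.toList ">>>>>>>".toList = false by simpa using h]
        rw [ih (incoming ++ [l])]
        simp [pvNotEnd, h, List.dropWhile_cons, List.takeWhile_cons]

-- B's head mode characterised by A's first inner scan (incoming buffer is empty in this mode)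
lemma bLoop_inHead (ls resolved head : List String) :
    bLoop ls .inHead resolved head [] =
      match ls.dropWhile pvNotSep with
      | [] => resolved ++ (if ([] : List String).length ≥ (head ++ ls.takeWhile pvNotSep).length
                then ([] : List String) else head ++ ls.takeWhile pvNotSep)
      | _ :: r => bLoop r .inIncoming resolved (head ++ ls.takeWhile pvNotSep) [] := by
  induction ls generalizing head with
  | nil => simp [bLoop]
  | cons l rest ih =>
      by_cases h : PySem.Str.startswith l "======="
      all_goals simp at h
      · simp [bLoop, h, pvNotSep, List.dropWhile_cons, List.takeWhile_cons]
      · simp only [bLoop, PySem.Str.startswith_eq]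
        simp only [show PySem.Chars.startswith l.toList "=======".toList = false by simpa using h]
        rw [ih (head ++ [l])]
        simp [pvNotSep, h, List.dropWhile_cons, List.takeWhile_cons]

-- main loop equivalence, by strong induction via a fuel bound
lemma bLoop_eq_aLoop (n : Nat) : ∀ (ls : List String), ls.length ≤ n →
    ∀ (resolved : List String), bLoop ls .normal resolved [] [] = resolved ++ aLoop ls := by
  induction n with
  | zero =>
      intro ls h resolved
      have : ls = [] := by cases ls <;> simp_all
      subst this; simp [bLoop, aLoop]
  | succ n ih =>
      intro ls h resolved
      match ls with
      | [] => simp [bLoop, aLoop]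
      | l :: rest =>
        by_cases hm : PySem.Str.startswith l "<<<<<<<"
        all_goals simp at hm
        · simp only [bLoop, PySem.Str.startswith_eq, hm, if_pos]
          rw [bLoop_inHead]
          rcases h1 : rest.dropWhile pvNotSep with _ | ⟨x, r1⟩
          · simp [aLoop, hm, h1]
          · simp only
            rw [bLoop_inIncoming]
            have hr1 : r1.length ≤ rest.length := by
              have := List.length_dropWhile_le pvNotSep rest
              rw [h1] at this; simp at this; omega
            have hdrop : ((rest.dropWhile pvNotSep).tail) = r1 := by rw [h1]; simp
            rcases h2 : r1.dropWhile pvNotEnd with _ | ⟨y, r2⟩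
            · simp [aLoop, hm, hdrop, h2]
            · simp only
              have hr2 : r2.length ≤ n := by
                have := List.length_dropWhile_le pvNotEnd r1
                rw [h2] at this; simp at this
                simp at h; omega
              rw [ih r2 hr2]
              simp [aLoop, hm, hdrop, h2, List.append_assoc]
        · simp only [bLoop, PySem.Str.startswith_eq, hm]
          have hr : rest.length ≤ n := by simp at h; omega
          rw [ih rest hr]
          simp [aLoop, hm]

-- ===== VERDICT (by name: the statement is the Claim_ definition above) =====
theorem auto_merge_conflict_blocks_spec : Claim_equal_auto_merge_conflict_blocks := by
  intro content _
  unfold Spec_auto_merge_conflict_blocks auto_merge_conflict_blocks auto_merge_conflict_blocks_alt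
  rw [bLoop_eq_aLoop (PySem.Str.splitlines content).length _ le_rfl]
  simp
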